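-- pv_equiv track=rewrite | github.com/nayani8/DSA-Python | Math/decimal_to_binary.py | decNum
-- ===== SOURCE A (Python) =====
-- def decNum(num):
--     ans = 0
--     power = 1
--     while num > 0:
--         rem = num % 2            # Get remainder (0 or 1)
--         num = num // 2           # Divide number by 2
--         ans += rem * power       # Add remainder * place value
--         power *= 10              # Move to next binary digit
--     return ans
-- ===== SOURCE B (Python) =====
-- def decNum(num):
--     return int(bin(num)[2:]) if num > 0 else 0
-- ===== Notes on version B (the rewrite author's own statement) =====
-- stated objective: idiomatic
-- what changed: Replaces the arithmetic accumulator loop (remainder times growing power of ten) with the library route: take bin(num), strip the '0b' prefix, and reinterpret the binary digit string as a base-10 integer; non-positive inputs return 0 exactly as A's loop (which never runs) does.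
import Mathlib
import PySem

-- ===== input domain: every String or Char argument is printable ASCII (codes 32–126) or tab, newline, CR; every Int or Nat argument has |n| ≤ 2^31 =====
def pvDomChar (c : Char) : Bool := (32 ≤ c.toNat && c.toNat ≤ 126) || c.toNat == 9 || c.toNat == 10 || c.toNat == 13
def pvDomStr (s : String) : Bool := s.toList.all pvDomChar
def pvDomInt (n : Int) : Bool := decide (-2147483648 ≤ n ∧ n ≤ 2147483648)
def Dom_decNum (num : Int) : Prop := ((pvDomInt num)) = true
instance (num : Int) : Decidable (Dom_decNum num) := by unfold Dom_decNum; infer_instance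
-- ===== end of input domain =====

-- B replaces A's remainder/place-value accumulator loop by the library route:
-- binary digits of num reinterpreted as a base-10 numeral (idiomatic, same cost).

-- ===== PORT A =====
-- the while loop of A, state (num, ans, power); terminates because num // 2 shrinks num.toNat
def decNumGo (num ans power : Int) : Int :=
  if h : num > 0 then
    decNumGo (PySem.Int.floordiv num 2) (ans + (PySem.Int.mod num 2) * power) (power * 10)
  else ans
termination_by num.toNat
decreasing_by
  simp [PySem.Int.floordiv, Int.fdiv_eq_ediv]
  omega

def decNum (num : Int) : Int := decNumGo num 0 1

-- ===== PORT B =====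
-- bin(num)[2:] is the binary digit string, MSB first; int() of it is its value read in base 10.
-- Nat.digits 2 gives the digits little-endian, so the foldr below is exactly that base-10 reading.
def decNum_alt (num : Int) : Int :=
  if num > 0 then ((Nat.digits 2 num.toNat).foldr (fun d acc => acc * 10 + d) 0 : Nat)
  else 0

-- ===== PRECONDITION & SPEC =====
def Spec_decNum (num : Int) (out : Int) : Prop := out = decNum_alt num
instance (num : Int) (out : Int) : Decidable (Spec_decNum num out) := by unfold Spec_decNum; infer_instance

-- ===== CLAIM (what is proved, stated in full; the proofs are below) =====
def Claim_equal_decNum : Prop := ∀ (num : Int), Dom_decNum num → Spec_decNum num (decNum num)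

-- ===== LEMMAS AND PROOFS =====
def decOf (n : Nat) : Nat := (Nat.digits 2 n).foldr (fun d acc => acc * 10 + d) 0

lemma decOf_succ (n : Nat) (h : 0 < n) : decOf n = decOf (n / 2) * 10 + n % 2 := by
  unfold decOf
  rw [Nat.digits_def' (by norm_num : 1 < 2) h]
  simp [List.foldr]

lemma decNumGo_eq (n : Nat) (ans power : Int) :
    decNumGo (n : Int) ans power = ans + power * (decOf n : Int) := by
  induction n using Nat.strong_induction_on generalizing ans power with
  | _ n ih =>
    rw [decNumGo.eq_def]
    by_cases h : (n : Int) > 0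
    · simp only [h, dite_true]
      have hn : 0 < n := by exact_mod_cast h
      have hfd : PySem.Int.floordiv (n : Int) 2 = ((n / 2 : Nat) : Int) := by
        simp [PySem.Int.floordiv, Int.fdiv_eq_ediv]
      have hmd : PySem.Int.mod (n : Int) 2 = ((n % 2 : Nat) : Int) := by
        simp [PySem.Int.mod, Int.fmod_eq_emod]
      rw [hfd, hmd, ih (n / 2) (Nat.div_lt_self hn (by norm_num))]
      rw [decOf_succ n hn]
      push_cast
      ring
    · simp only [h, dite_false]
      have hn : n = 0 := by omega
      subst hn
      simp [decOf]

-- ===== VERDICT (by name: the statement is the Claim_ definition above) =====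
theorem decNum_spec : Claim_equal_decNum := by
  intro num _
  unfold Spec_decNum decNum decNum_alt
  by_cases h : num > 0
  · have hn : ((num.toNat : Int)) = num := Int.toNat_of_nonneg (le_of_lt h)
    rw [if_pos h]
    conv_lhs => rw [← hn]
    rw [decNumGo_eq]
    simp [decOf]
  · rw [decNumGo.eq_def]
    simp [h]
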